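-- pv_equiv track=rewrite | github.com/Johnson-Durui/Cognitive-Lagrange-Point | AI-Daily-Digest/main.py | _detail_slug
-- ===== SOURCE A (Python) =====
-- from typing import Any
--
-- def _detail_slug(item: dict[str, Any]) -> str:
--     source = item.get("source", "item")
--     title = item.get("full_name") or item.get("title") or item.get("name") or item.get("id", "item")
--     raw = f"{source}-{title}".lower()
--     slug = []
--     for char in raw:
--         if char.isalnum():
--             slug.append(char)
--         elif char in {"-", "_"}:
--             slug.append(char)
--         else:
--             slug.append("-")
--     compact = "".join(slug)
--     while "--" in compact:
--         compact = compact.replace("--", "-")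
--     return compact.strip("-")[:96]
-- ===== SOURCE B (Python) =====
-- def _detail_slug(item):
--     source = item.get("source", "item")
--     title = item.get("full_name") or item.get("title") or item.get("name") or item.get("id", "item")
--     raw = f"{source}-{title}".lower()
--     out = []
--     pending = False
--     for ch in raw:
--         if ch.isalnum() or ch == "_":
--             if pending:
--                 out.append("-")
--                 pending = False
--             out.append(ch)
--         elif out:
--             pending = True
--     return "".join(out[:96])
-- ===== Notes on version B (the rewrite author's own statement) =====
-- stated objective: alternative
-- what changed: Replaces A's map-then-repeated-replace('--','-')-then-strip pipeline by a single pass over the string that emits kept characters and collapses/strips dash runs on the fly with a pending-dash flag.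
import Mathlib
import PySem

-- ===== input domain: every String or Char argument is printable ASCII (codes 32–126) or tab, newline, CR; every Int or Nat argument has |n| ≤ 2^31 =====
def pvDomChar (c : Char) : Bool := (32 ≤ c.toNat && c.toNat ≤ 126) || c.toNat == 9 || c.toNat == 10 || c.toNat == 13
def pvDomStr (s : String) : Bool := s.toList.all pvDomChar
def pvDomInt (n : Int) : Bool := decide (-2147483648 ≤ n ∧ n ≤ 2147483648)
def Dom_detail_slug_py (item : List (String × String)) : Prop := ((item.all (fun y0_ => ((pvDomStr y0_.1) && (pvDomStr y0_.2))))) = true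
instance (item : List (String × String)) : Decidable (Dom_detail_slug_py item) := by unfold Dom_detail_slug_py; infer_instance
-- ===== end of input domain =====

-- B replaces A's map / repeated replace("--","-") / strip("-") pipeline by one pass that
-- collapses and strips dash runs on the fly with a pending-dash flag (alternative algorithm,
-- same cost in practice); the return values are proved equal on every input.

-- ===== PORT A =====
-- Python `x or y` where x is an Optional[str]: y if x is None or "" else x
def pvOrOpt (a : Option String) (b : String) : String :=
  match a with
  | some s => if s == "" then b else s
  | none => b

-- shared verbatim by both Pythons: the source / title lookups and
-- raw = f"{source}-{title}".lower()  (the f-string is ported, exactly, as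
-- concatenation of the code-point lists)
def pvRawChars (item : List (String × String)) : List Char :=
  let d := PySem.Dict.ofList item
  let source := PySem.Dict.getD d "source" "item"
  let title := pvOrOpt (PySem.Dict.get? d "full_name")
      (pvOrOpt (PySem.Dict.get? d "title")
        (pvOrOpt (PySem.Dict.get? d "name") (PySem.Dict.getD d "id" "item")))
  PySem.Chars.lower (source.toList ++ '-' :: title.toList)

-- One Python pass of compact.replace("--", "-") in recursive form, with the lemmas the
-- termination proof of the while-loop port pvCollapse needs (replace shortens the string).
def pvRepl : List Char → List Char
  | '-' :: '-' :: t => '-' :: pvRepl t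
  | c :: t => c :: pvRepl t
  | [] => []

theorem pvRepl_dd (t : List Char) : pvRepl ('-' :: '-' :: t) = '-' :: pvRepl t := rfl
theorem pvRepl_cons (c : Char) (t : List Char) (h : ¬(c = '-' ∧ t.head? = some '-')) :
    pvRepl (c :: t) = c :: pvRepl t := by
  rw [pvRepl.eq_def]; split <;> simp_all

theorem isPrefixOf_dd (c : Char) (t : List Char) :
    (['-','-'] : List Char).isPrefixOf (c :: t) = true ↔ (c = '-' ∧ t.head? = some '-') := by
  rw [List.isPrefixOf_iff_prefix, List.cons_prefix_cons]
  cases t <;> simp [List.cons_prefix_cons, eq_comm]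

theorem pvRepl_go (fuel : Nat) : ∀ (l acc : List Char), l.length ≤ fuel →
    PySem.Chars.replace.go ['-', '-'] ['-'] fuel l acc = acc.reverse ++ pvRepl l := by
  induction fuel with
  | zero =>
    intro l acc h
    have hl : l = [] := by cases l <;> simp_all
    subst hl
    rw [PySem.Chars.replace.go]
    simp [pvRepl]
  | succ n ih =>
    intro l acc h
    cases l with
    | nil =>
      rw [PySem.Chars.replace.go]
      · simp [pvRepl]
      · omega
    | cons c t =>
      rw [PySem.Chars.replace.go]
      by_cases hdd : c = '-' ∧ t.head? = some '-'
      · rw [if_pos ((isPrefixOf_dd c t).mpr hdd)]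
        obtain ⟨hc, hh⟩ := hdd
        subst hc
        cases t with
        | nil => simp at hh
        | cons d t2 =>
          simp at hh
          subst hh
          have : t2.length ≤ n := by simp at h; omega
          rw [show (List.drop (['-','-'] : List Char).length ('-' :: '-' :: t2)) = t2 by simp]
          rw [ih t2 _ this, pvRepl_dd]
          simp
      · rw [if_neg (by simp [isPrefixOf_dd c t, hdd])]
        have : t.length ≤ n := by simp at h; omega
        rw [ih t _ this, pvRepl_cons c t hdd]
        simp

theorem pvReplace_eq (s : List Char) :
    PySem.Chars.replace s ['-', '-'] ['-'] = pvRepl s := by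
  have := pvRepl_go s.length s [] le_rfl
  simp [PySem.Chars.replace]
  simpa using this

theorem pvRepl_notdd_of_hyp {c : Char} {t : List Char}
    (x : ∀ (t' : List Char), c = '-' → ¬t = '-' :: t') : ¬(c = '-' ∧ t.head? = some '-') := by
  rintro ⟨hc, hh⟩
  cases t with
  | nil => simp at hh
  | cons d t2 => simp at hh; exact x t2 hc (by rw [hh])

theorem pvRepl_length_le (s : List Char) : (pvRepl s).length ≤ s.length := by
  induction s using pvRepl.induct with
  | case1 t ih => rw [pvRepl_dd]; simp; omega
  | case2 c t x ih => rw [pvRepl_cons c t (pvRepl_notdd_of_hyp x)]; simp; omega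
  | case3 => simp [pvRepl]

theorem pvRepl_length_lt (s : List Char) (h : ['-', '-'] <:+: s) :
    (pvRepl s).length < s.length := by
  induction s using pvRepl.induct with
  | case1 t ih =>
    rw [pvRepl_dd]
    have := pvRepl_length_le t
    simp
    omega
  | case2 c t x ih =>
    have hnd := pvRepl_notdd_of_hyp x
    rw [pvRepl_cons c t hnd]
    rcases (List.infix_cons_iff).mp h with hp | hi
    · exfalso
      rw [List.cons_prefix_cons] at hp
      obtain ⟨hc, hp2⟩ := hp
      rcases hp2 with ⟨t', ht'⟩
      apply hnd
      refine ⟨hc.symm, ?_⟩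
      rw [← ht']
      simp
    · have := ih hi
      simp
      omega
  | case3 => simp at h

theorem pvReplace_length_lt' (s : List Char) (h : PySem.Chars.isIn ['-', '-'] s = true) :
    (PySem.Chars.replace s ['-', '-'] ['-']).length < s.length := by
  rw [pvReplace_eq]
  exact pvRepl_length_lt s ((PySem.Chars.isIn_iff_infix _ _).mp h)

-- Python: while "--" in compact: compact = compact.replace("--", "-")
def pvCollapse (s : List Char) : List Char :=
  if h : PySem.Chars.isIn ['-', '-'] s = true then
    pvCollapse (PySem.Chars.replace s ['-', '-'] ['-'])
  else s
termination_by s.length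
decreasing_by exact pvReplace_length_lt' s h


def detail_slug_py (item : List (String × String)) : String :=
  let raw := pvRawChars item
  let slug := raw.foldl (fun acc c =>
      if PySem.Chars.isalnum c then acc ++ [c]
      else if c == '-' || c == '_' then acc ++ [c]
      else acc ++ ['-']) []
  let compact := pvCollapse slug
  String.ofList (PySem.List.slice (PySem.Chars.stripChars compact ['-']) none (some 96))

-- ===== PORT B =====
def detail_slug_py_alt (item : List (String × String)) : String :=
  let raw := pvRawChars item
  let st := raw.foldl (fun st c =>
      if PySem.Chars.isalnum c || c == '_' then
        ((if st.2 then st.1 ++ ['-'] else st.1) ++ [c], false)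
      else if st.1.isEmpty then st
      else (st.1, true))
    (([] : List Char), false)
  String.ofList (PySem.List.slice st.1 none (some 96))

-- ===== PRECONDITION & SPEC =====
def Spec_detail_slug_py (item : List (String × String)) (out : String) : Prop := out = detail_slug_py_alt item
instance (item : List (String × String)) (out : String) : Decidable (Spec_detail_slug_py item out) := by unfold Spec_detail_slug_py; infer_instance

-- ===== CLAIM (what is proved, stated in full; the proofs are below) =====
def Claim_equal_detail_slug_py : Prop := ∀ (item : List (String × String)), Dom_detail_slug_py item → Spec_detail_slug_py item (detail_slug_py item)

-- ===== LEMMAS AND PROOFS =====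

def pvDed : List Char → List Char
  | '-' :: '-' :: t => pvDed ('-' :: t)
  | c :: t => c :: pvDed t
  | [] => []
termination_by s => s.length
decreasing_by all_goals simp

theorem pvDed_dd (t : List Char) : pvDed ('-' :: '-' :: t) = pvDed ('-' :: t) := by
  rw [pvDed.eq_def]
  split
  · simp_all
  · rename_i x heq
    injection heq with h1 h2
    exact absurd h2.symm (x _ h1.symm)
  · simp_all
theorem pvDed_cons (c : Char) (t : List Char) (h : ¬(c = '-' ∧ t.head? = some '-')) :
    pvDed (c :: t) = c :: pvDed t := by
  rw [pvDed.eq_def]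
  split
  · rename_i t1 heq
    injection heq with h1 h2
    exact absurd ⟨h1, by rw [h2]; rfl⟩ h
  · rename_i c1 t1 x heq
    injection heq with h1 h2
    rw [h1, h2]
  · rename_i heq
    cases heq
theorem pvDed_nil : pvDed [] = [] := by rw [pvDed.eq_def]

theorem pvDed_head? (s : List Char) : (pvDed s).head? = s.head? := by
  induction s using pvDed.induct with
  | case1 t ih => rw [pvDed_dd]; simp_all
  | case2 c t x ih => rw [pvDed_cons c t (pvRepl_notdd_of_hyp x)]; simp
  | case3 => rw [pvDed_nil]

theorem pvRepl_head? (s : List Char) : (pvRepl s).head? = s.head? := by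
  induction s using pvRepl.induct with
  | case1 t ih => rw [pvRepl_dd]; simp
  | case2 c t x ih => rw [pvRepl_cons c t (pvRepl_notdd_of_hyp x)]; simp
  | case3 => simp [pvRepl]

-- R4
theorem pvDed_pvRepl (s : List Char) : pvDed (pvRepl s) = pvDed s := by
  induction s using pvRepl.induct with
  | case1 t ih =>
    rw [pvRepl_dd, pvDed_dd]
    cases t with
    | nil => simp [pvRepl]
    | cons d t2 =>
      by_cases hd : d = '-'
      · subst hd
        have hh : (pvRepl ('-' :: t2)).head? = some '-' := by rw [pvRepl_head?]; rfl
        cases hr : pvRepl ('-' :: t2) with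
        | nil => simp [hr] at hh
        | cons e u =>
          rw [hr] at hh ih
          simp at hh
          subst hh
          rw [pvDed_dd, pvDed_dd]
          exact ih
      · have h1 : ¬(('-' : Char) = '-' ∧ (d :: t2).head? = some '-') := by simp [hd]
        have h2 : ¬(('-' : Char) = '-' ∧ (pvRepl (d :: t2)).head? = some '-') := by
          rw [pvRepl_head?]; simp [hd]
        rw [pvDed_cons _ _ h2, pvDed_cons _ _ h1, ih]
  | case2 c t x ih =>
    have hnd := pvRepl_notdd_of_hyp x
    rw [pvRepl_cons c t hnd]
    by_cases hc : c = '-'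
    · subst hc
      have hth : t.head? ≠ some '-' := fun hh => hnd ⟨rfl, hh⟩
      have h2 : ¬(('-' : Char) = '-' ∧ (pvRepl t).head? = some '-') := by
        rw [pvRepl_head?]; simp [hth]
      rw [pvDed_cons _ _ h2, pvDed_cons _ _ (by simp [hth]), ih]
    · rw [pvDed_cons _ _ (by simp [hc]), pvDed_cons _ _ (by simp [hc]), ih]
  | case3 => simp [pvRepl]

-- R5
theorem pvDed_of_not_infix (s : List Char) (h : ¬ ['-','-'] <:+: s) : pvDed s = s := by
  induction s using pvDed.induct with
  | case1 t ih => exact absurd (List.infix_cons_iff.mpr (Or.inl (by simp))) h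
  | case2 c t x ih =>
    rw [pvDed_cons c t (pvRepl_notdd_of_hyp x), ih (fun hi => h (List.infix_cons hi))]
  | case3 => rw [pvDed_nil]

-- R7
theorem pvDed_not_infix (s : List Char) : ¬ ['-','-'] <:+: pvDed s := by
  induction s using pvDed.induct with
  | case1 t ih => rw [pvDed_dd]; exact ih
  | case2 c t x ih =>
    have hnd := pvRepl_notdd_of_hyp x
    rw [pvDed_cons c t hnd]
    intro hi
    rcases List.infix_cons_iff.mp hi with hp | hi2
    · rw [List.cons_prefix_cons] at hp
      obtain ⟨hc, hp2⟩ := hp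
      rcases hp2 with ⟨u, hu⟩
      apply hnd
      refine ⟨hc.symm, ?_⟩
      rw [← pvDed_head? t, ← hu]
      simp
    · exact ih hi2
  | case3 => rw [pvDed_nil]; simp

-- R8
theorem pvDed_getLast? (s : List Char) : (pvDed s).getLast? = s.getLast? := by
  induction s using pvDed.induct with
  | case1 t ih => rw [pvDed_dd]; rw [ih]; simp [List.getLast?_cons_cons]
  | case2 c t x ih =>
    rw [pvDed_cons c t (pvRepl_notdd_of_hyp x)]
    cases ht : pvDed t with
    | nil =>
      cases t with
      | nil => simp
      | cons d u =>
        exfalso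
        have h1 := pvDed_head? (d :: u)
        rw [ht] at h1
        simp at h1
    | cons e u =>
      rw [List.getLast?_cons_cons]
      rw [← ht, ih]
      cases t with
      | nil => rw [pvDed_nil] at ht; cases ht
      | cons d v => simp [List.getLast?_cons_cons]
  | case3 => rw [pvDed_nil]

def pvQ (c : Char) : Bool := c == '-'
def pvLst (u : List Char) : List Char := List.dropWhile pvQ u
def pvStrip (u : List Char) : List Char := (List.dropWhile pvQ (pvLst u).reverse).reverse

theorem strip_def (u : List Char) : PySem.Chars.stripChars u ['-'] = pvStrip u := by
  have hq : (fun c => (['-'] : List Char).contains c) = pvQ := by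
    funext c; by_cases h : c = '-' <;> simp [pvQ, h]
  unfold PySem.Chars.stripChars
  rw [hq]
  rfl

theorem dropWhile_head_false {d : Char} (l : List Char)
    (h : (List.dropWhile pvQ l).head? = some d) : pvQ d = false := by
  induction l with
  | nil => simp at h
  | cons a t ih =>
    rw [List.dropWhile_cons] at h
    by_cases ha : pvQ a = true
    · rw [if_pos ha] at h; exact ih h
    · rw [if_neg ha] at h; simp at h; subst h; simpa using ha
  
theorem dropWhile_of_head_false {l : List Char} (h : ∀ d, l.head? = some d → pvQ d = false) :
    List.dropWhile pvQ l = l := by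
  cases l with
  | nil => rfl
  | cons a t => rw [List.dropWhile_cons, if_neg (by simp [h a rfl])]

-- S1
theorem strip_append_keep (u : List Char) (c : Char) (hc : pvQ c = false) :
    pvStrip (u ++ [c]) = pvLst u ++ [c] := by
  have h1 : pvLst (u ++ [c]) = pvLst u ++ [c] := by
    unfold pvLst
    rw [List.dropWhile_append]
    by_cases he : (List.dropWhile pvQ u).isEmpty
    · rw [if_pos he]
      rw [List.isEmpty_iff] at he
      rw [he]
      simp [hc]
    · rw [if_neg he]
  unfold pvStrip
  rw [h1]
  rw [List.reverse_append]
  simp only [List.reverse_singleton, List.singleton_append]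
  rw [List.dropWhile_cons, if_neg (by simp [hc])]
  simp

-- S2
theorem strip_append_dash (u : List Char) : pvStrip (u ++ ['-']) = pvStrip u := by
  unfold pvStrip pvLst
  rw [List.dropWhile_append]
  by_cases he : (List.dropWhile pvQ u).isEmpty
  · rw [if_pos he]
    have h2 : List.dropWhile pvQ ['-'] = [] := by simp [pvQ]
    rw [h2]
    rw [List.isEmpty_iff] at he
    rw [he]
  · rw [if_neg he]
    rw [List.reverse_append]
    simp only [List.reverse_singleton, List.singleton_append]
    rw [List.dropWhile_cons (x := '-'), if_pos (by simp [pvQ])]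

-- S3
theorem lst_eq_strip (u : List Char) (hnd : ¬ ['-','-'] <:+: u) :
    pvLst u = if u.getLast? = some '-' ∧ pvStrip u ≠ [] then pvStrip u ++ ['-'] else pvStrip u := by
  by_cases hv : pvLst u = []
  · rw [hv]
    have hs : pvStrip u = [] := by unfold pvStrip; rw [hv]; rfl
    rw [if_neg (by simp [hs])]
    exact hs.symm
  · -- v nonempty
    have hsuf : pvLst u <:+ u := List.dropWhile_suffix pvQ
    have hlast : (pvLst u).getLast? = u.getLast? := by
      obtain ⟨w, hw⟩ := hsuf
      conv_rhs => rw [← hw]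
      rw [List.getLast?_append]
      cases hl : (pvLst u).getLast? with
      | none => exact absurd (List.getLast?_eq_none_iff.mp hl) hv
      | some d => simp
    have hndv : ¬ ['-','-'] <:+: pvLst u := fun hi => hnd (hi.trans hsuf.isInfix)
    have hhead : ∀ d, (pvLst u).head? = some d → pvQ d = false := fun d hd =>
      dropWhile_head_false u hd
    by_cases hld : u.getLast? = some '-'
    · -- v ends with dash
      have hvl : (pvLst u).getLast? = some '-' := by rw [hlast, hld]
      have hsplit : (pvLst u).dropLast ++ ['-'] = pvLst u :=
        List.dropLast_append_getLast? '-' hvl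
      set w := (pvLst u).dropLast with hwdef
      have hwne : w ≠ [] := by
        intro hwnil
        rw [hwnil] at hsplit
        simp at hsplit
        have := hhead '-' (by rw [← hsplit]; rfl)
        simp [pvQ] at this
      have hwlast : ∀ d, w.getLast? = some d → pvQ d = false := by
        intro d hd
        by_cases hdq : d = '-'
        · exfalso
          subst hdq
          have hws : w.dropLast ++ ['-'] = w := List.dropLast_append_getLast? '-' hd
          apply hndv
          rw [← hsplit, ← hws]
          exact ⟨w.dropLast, [], by simp⟩
        · simp [pvQ, hdq]
      have hstrip : pvStrip u = w := by
        unfold pvStrip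
        rw [← hsplit, List.reverse_append]
        simp only [List.reverse_singleton, List.singleton_append]
        rw [List.dropWhile_cons, if_pos (by simp [pvQ])]
        rw [dropWhile_of_head_false (by intro d hd; exact hwlast d (by rwa [List.head?_reverse] at hd))]
        simp
      rw [if_pos ⟨hld, by rw [hstrip]; exact hwne⟩, hstrip, hsplit]
    · -- v does not end with dash
      have hstrip : pvStrip u = pvLst u := by
        unfold pvStrip
        rw [dropWhile_of_head_false]
        · simp
        · intro d hd
          rw [List.head?_reverse, hlast] at hd
          by_cases hdq : d = '-'
          · exact absurd (hdq ▸ hd) hld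
          · simp [pvQ, hdq]
      rw [if_neg (fun hcon => hld hcon.1), hstrip]

-- D2
theorem pvDed_append_keep (s : List Char) (c : Char) (hc : c ≠ '-') :
    pvDed (s ++ [c]) = pvDed s ++ [c] := by
  induction s using pvDed.induct with
  | case1 t ih =>
    rw [show ('-' :: '-' :: t) ++ [c] = '-' :: '-' :: (t ++ [c]) by simp]
    rw [pvDed_dd, pvDed_dd, show '-' :: (t ++ [c]) = ('-' :: t) ++ [c] by simp, ih]
  | case2 a t x ih =>
    have hnd := pvRepl_notdd_of_hyp x
    rw [show (a :: t) ++ [c] = a :: (t ++ [c]) by simp]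
    cases t with
    | nil =>
      simp only [List.nil_append]
      have h1 : ¬(a = '-' ∧ ([c] : List Char).head? = some '-') := by
        rintro ⟨_, hh⟩; simp at hh; exact hc hh
      rw [pvDed_cons a [c] h1, pvDed_cons a [] (by simp)]
      have h2 : ¬((c : Char) = '-' ∧ ([] : List Char).head? = some '-') := by simp [hc]
      rw [pvDed_cons c [] h2, pvDed_nil]
      simp
    | cons d t2 =>
      have hh : ((d :: t2) ++ [c]).head? = some d := rfl
      have h1 : ¬(a = '-' ∧ ((d :: t2) ++ [c]).head? = some '-') := by
        rw [hh]; intro hcon; exact hnd ⟨hcon.1, by simp [hcon.2]⟩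
      rw [pvDed_cons a _ h1, pvDed_cons a _ hnd, ih]
      simp
  | case3 =>
    rw [pvDed_nil]
    simp
    rw [pvDed_cons c [] (by simp [hc]), pvDed_nil]

-- D1
theorem pvDed_append_dash (s : List Char) :
    pvDed (s ++ ['-']) = if s.getLast? = some '-' then pvDed s else pvDed s ++ ['-'] := by
  induction s using pvDed.induct with
  | case1 t ih =>
    rw [show ('-' :: '-' :: t) ++ ['-'] = '-' :: '-' :: (t ++ ['-']) by simp]
    rw [pvDed_dd, pvDed_dd, show '-' :: (t ++ ['-']) = ('-' :: t) ++ ['-'] by simp, ih]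
    have : ('-' :: '-' :: t).getLast? = ('-' :: t).getLast? := by simp [List.getLast?_cons_cons]
    rw [this]
  | case2 a t x ih =>
    have hnd := pvRepl_notdd_of_hyp x
    rw [show (a :: t) ++ ['-'] = a :: (t ++ ['-']) by simp]
    cases t with
    | nil =>
      simp only [List.nil_append]
      by_cases ha : a = '-'
      · subst ha
        rw [pvDed_dd]
        simp
      · rw [pvDed_cons a ['-'] (by simp [ha]), pvDed_cons a [] (by simp)]
        have h1 : pvDed ['-'] = ['-'] := by rw [pvDed_cons '-' [] (by simp), pvDed_nil]
        rw [h1, pvDed_nil]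
        simp [ha]
    | cons d t2 =>
      have hh : ((d :: t2) ++ ['-']).head? = some d := rfl
      have h1 : ¬(a = '-' ∧ ((d :: t2) ++ ['-']).head? = some '-') := by
        rw [hh]; intro hcon; exact hnd ⟨hcon.1, by simp [hcon.2]⟩
      rw [pvDed_cons a _ h1, pvDed_cons a _ hnd, ih]
      have hlast : (a :: d :: t2).getLast? = (d :: t2).getLast? := by simp [List.getLast?_cons_cons]
      rw [hlast]
      by_cases hl : (d :: t2).getLast? = some '-'
      · rw [if_pos hl, if_pos hl]
      · rw [if_neg hl, if_neg hl]
        simp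
  | case3 =>
    rw [pvDed_nil]
    simp
    rw [pvDed_cons '-' [] (by simp), pvDed_nil]

theorem pvCollapse_eq (s : List Char) : pvCollapse s = pvDed s := by
  induction s using pvCollapse.induct with
  | case1 s h ih =>
    rw [pvCollapse, dif_pos h, ih, pvReplace_eq, pvDed_pvRepl]
  | case2 s h =>
    rw [pvCollapse, dif_neg h]
    have : ¬ ['-','-'] <:+: s := by
      intro hi
      exact h ((PySem.Chars.isIn_iff_infix _ _).mpr hi)
    rw [pvDed_of_not_infix s this]

def pvKeep (c : Char) : Bool := PySem.Chars.isalnum c || c == '_'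
def pvG (c : Char) : Char :=
  if PySem.Chars.isalnum c then c else if c == '-' || c == '_' then c else '-'

theorem pvG_of_keep (c : Char) (h : pvKeep c = true) : pvG c = c := by
  unfold pvG
  unfold pvKeep at h
  rcases Bool.or_eq_true_iff.mp h with h1 | h1 <;> simp [h1]

theorem ne_dash_of_keep (c : Char) (h : pvKeep c = true) : c ≠ '-' := by
  intro hc
  subst hc
  revert h
  decide

theorem pvG_of_not_keep (c : Char) (h : pvKeep c = false) : pvG c = '-' := by
  unfold pvKeep at h
  rw [Bool.or_eq_false_iff] at h
  unfold pvG
  rw [if_neg (by simp [h.1])]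
  by_cases hc : c = '-'
  · simp [hc]
  · rw [if_neg (by simp [hc, h.2])]

-- the single-pass loop of B
def pvStepB (st : List Char × Bool) (c : Char) : List Char × Bool :=
  if PySem.Chars.isalnum c || c == '_' then
    ((if st.2 then st.1 ++ ['-'] else st.1) ++ [c], false)
  else if st.1.isEmpty then st
  else (st.1, true)

theorem fold_inv (raw : List Char) :
    raw.foldl pvStepB (([] : List Char), false) =
      (pvStrip (pvDed (raw.map pvG)),
        decide ((raw.map pvG).getLast? = some '-') && !(pvStrip (pvDed (raw.map pvG))).isEmpty) := by
  induction raw using List.reverseRecOn with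
  | nil => simp [pvDed_nil, pvStrip, pvLst]
  | append_singleton raw c ih =>
    rw [List.foldl_append, ih]
    simp only [List.foldl_cons, List.foldl_nil, List.map_append, List.map_cons, List.map_nil]
    by_cases hk : pvKeep c = true
    · have hgc := pvG_of_keep c hk
      have hcd := ne_dash_of_keep c hk
      rw [pvStepB, if_pos (by unfold pvKeep at hk; exact hk)]
      rw [hgc]
      rw [show (raw.map pvG) ++ [c] = (raw.map pvG).concat c by simp, List.concat_eq_append]
      rw [pvDed_append_keep _ c hcd]
      rw [strip_append_keep _ c (by simp [pvQ, hcd])]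
      rw [lst_eq_strip _ (pvDed_not_infix (raw.map pvG))]
      rw [pvDed_getLast?]
      rw [List.getLast?_concat]
      by_cases hl : (raw.map pvG).getLast? = some '-' <;>
        by_cases hF : pvStrip (pvDed (raw.map pvG)) = [] <;>
          simp [hl, hF, hcd]
    · have hk' : pvKeep c = false := by simpa using hk
      have hgc := pvG_of_not_keep c hk'
      rw [pvStepB, if_neg (by unfold pvKeep at hk'; simp [hk'])]
      rw [hgc]
      rw [show (raw.map pvG) ++ ['-'] = (raw.map pvG).concat '-' by simp, List.concat_eq_append]
      rw [pvDed_append_dash]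
      rw [List.getLast?_concat]
      by_cases hl : (raw.map pvG).getLast? = some '-'
      · rw [if_pos hl]
        by_cases hF : pvStrip (pvDed (raw.map pvG)) = [] <;> simp [hl, hF]
      · rw [if_neg hl]
        rw [strip_append_dash]
        by_cases hF : pvStrip (pvDed (raw.map pvG)) = [] <;> simp [hF]

theorem detail_slug_py_spec : Claim_equal_detail_slug_py := by
  unfold Claim_equal_detail_slug_py
  intro item _
  unfold Spec_detail_slug_py detail_slug_py detail_slug_py_alt
  dsimp only
  have hstep : (fun (acc : List Char) (c : Char) =>
      if PySem.Chars.isalnum c then acc ++ [c]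
      else if c == '-' || c == '_' then acc ++ [c]
      else acc ++ ['-']) = (fun acc c => acc ++ [pvG c]) := by
    funext acc c
    unfold pvG
    by_cases h1 : PySem.Chars.isalnum c
    · simp [h1]
    · by_cases h2 : (c == '-' || c == '_') = true <;> simp [h1, h2]
  have hstepB : (fun (st : List Char × Bool) (c : Char) =>
      if PySem.Chars.isalnum c || c == '_' then
        ((if st.2 then st.1 ++ ['-'] else st.1) ++ [c], false)
      else if st.1.isEmpty then st else (st.1, true)) = pvStepB := rfl
  rw [hstep, PySem.List.foldl_append_singleton_eq_map, List.nil_append]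
  rw [pvCollapse_eq, strip_def]
  rw [hstepB, fold_inv]
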